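-- pv_equiv track=rewrite | github.com/edt-yxz-zzd/python3_src | seed/io/iter_line_contents__ver2.py | split_out_newline_
-- ===== SOURCE A (Python) =====
-- def split_out_newline_(newlines, line, /):
--     r'''-> (line_content, smay_newline)
--
--     precondition:
--         [check_newlines(newlines)]
--             [len(newlines) > 0]
--             [all(newlines)]
--             [newlines == tuple(sorted(newlines, key=len))]
--
--     postcondition:
--         [line == line_content++smay_newline]
--
--     '''#'''
--     #check_newlines(newlines)
--
--     for newline in reversed(newlines):
--         #assert newlines == tuple(sorted(newlines, key=len))
--         #   <<== [check_newlines(newlines)]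
--         if line.endswith(newline):
--             smay_newline = newline
--             break
--     else:
--         smay_newline = ''
--     smay_newline
--     L = len(line)-len(smay_newline)
--     line_content = line[:L]
--     assert smay_newline == line[L:]
--     return (line_content, smay_newline)
-- ===== SOURCE B (Python) =====
-- def split_out_newline_(newlines, line, /):
--     # Hash-index algorithm: map each newline to its last position once, then
--     # probe line's suffix of each distinct newline length against that index
--     # and keep the hit with the greatest position (= A's last matching element).
--     # No endswith scan over newlines at all.
--     last_at = {}
--     for i, nl in enumerate(newlines):
--         last_at[nl] = i
--     n = len(line)
--     best, best_i = '', -1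
--     for L in set(len(nl) for nl in newlines):
--         if L <= n:
--             suf = line[n - L:]
--             i = last_at.get(suf, -1)
--             if i > best_i:
--                 best, best_i = suf, i
--     return (line[:n - len(best)], best)
-- ===== Notes on version B (the rewrite author's own statement) =====
-- stated objective: alternative
-- what changed: Instead of scanning reversed(newlines) with endswith, B builds a hash index newline->last position once and probes line's suffix of each distinct newline length against it, keeping the hit with the greatest position; the endswith scan over newlines disappears.
import Mathlib
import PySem

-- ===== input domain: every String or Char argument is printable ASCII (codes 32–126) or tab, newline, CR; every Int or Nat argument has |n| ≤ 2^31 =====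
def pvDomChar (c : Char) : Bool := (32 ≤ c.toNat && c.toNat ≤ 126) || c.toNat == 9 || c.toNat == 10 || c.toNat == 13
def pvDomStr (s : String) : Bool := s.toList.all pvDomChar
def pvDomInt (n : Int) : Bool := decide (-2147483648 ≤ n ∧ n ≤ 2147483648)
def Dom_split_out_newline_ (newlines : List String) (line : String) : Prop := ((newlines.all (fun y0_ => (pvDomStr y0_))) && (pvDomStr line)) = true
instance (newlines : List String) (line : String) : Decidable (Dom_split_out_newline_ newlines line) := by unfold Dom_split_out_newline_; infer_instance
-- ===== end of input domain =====

-- B replaces A's reversed endswith scan by a hash index newline -> last position,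
-- probed with line's suffix of each distinct newline length; return value only.

-- ===== PORT A =====
-- the `for … break / else` loop over reversed(newlines): first suffix match, else ''
def pvFindA (line : String) : List String → String
  | [] => ""
  | nl :: rest => if PySem.Str.endswith line nl then nl else pvFindA line rest

def split_out_newline_ (newlines : List String) (line : String) : String × String :=
  let smay_newline := pvFindA line newlines.reverse
  let L : Int := (PySem.Str.len line : Int) - (PySem.Str.len smay_newline : Int)
  let line_content := PySem.Str.slice line none (some L)
  -- the `assert smay_newline == line[L:]` always holds (smay_newline is a suffix of line), never raises
  (line_content, smay_newline)

-- ===== PORT B =====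
def split_out_newline__alt (newlines : List String) (line : String) : String × String :=
  let last_at : PySem.Dict String Int :=
    (PySem.List.enumerate newlines 0).foldl (fun d q => d.insert q.2 q.1) PySem.Dict.empty
  let n : Int := (PySem.Str.len line : Int)
  let lens : PySem.Set Int := PySem.Set.ofList (newlines.map (fun nl => ((PySem.Str.len nl : Int))))
  let r : String × Int := lens.foldl (fun acc L =>
      if L ≤ n then
        let suf := PySem.Str.slice line (some (n - L)) none
        let i := last_at.getD suf (-1)
        if acc.2 < i then (suf, i) else acc
      else acc) ("", -1)
  (PySem.Str.slice line none (some (n - (PySem.Str.len r.1 : Int))), r.1)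

-- ===== PRECONDITION & SPEC =====
def Spec_split_out_newline_ (newlines : List String) (line : String) (out : String × String) : Prop := out = split_out_newline__alt newlines line
instance (newlines : List String) (line : String) (out : String × String) : Decidable (Spec_split_out_newline_ newlines line out) := by unfold Spec_split_out_newline_; infer_instance

-- ===== CLAIM (what is proved, stated in full; the proofs are below) =====
def Claim_equal_split_out_newline_ : Prop := ∀ (newlines : List String) (line : String), Dom_split_out_newline_ newlines line → Spec_split_out_newline_ newlines line (split_out_newline_ newlines line)

-- ===== LEMMAS AND PROOFS =====

-- A's scan is find? along the reversed list
theorem pvFindA_eq_find? (line : String) (l : List String) :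
    pvFindA line l = (l.find? (fun nl => PySem.Str.endswith line nl)).getD "" := by
  induction l with
  | nil => rfl
  | cons nl rest ih =>
    simp only [PySem.Str.endswith_eq] at ih ⊢
    by_cases h : PySem.Chars.endswith line.toList nl.toList = true
    · simp [pvFindA, h]
    · simp [pvFindA, h, ih]

-- the dict built by `for i, nl in enumerate(xs): last_at[nl] = i` answers queries by
-- first match over the REVERSED pair list
theorem pvDict_get? (ps : List (Int × String)) (d0 : PySem.Dict String Int) (s : String) :
    (ps.foldl (fun d q => d.insert q.2 q.1) d0).get? s =
      match ps.reverse.find? (fun q => q.2 == s) with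
      | some q => some q.1
      | none => d0.get? s := by
  induction ps using List.reverseRecOn generalizing d0 with
  | nil => rfl
  | append_singleton t q ih =>
    rw [List.foldl_append]
    simp only [List.foldl_cons, List.foldl_nil, List.reverse_append, List.reverse_singleton,
      List.singleton_append, List.find?_cons]
    by_cases h : q.2 = s
    · subst h; simp [PySem.Dict.get?_insert_self]
    · have h' : (q.2 == s) = false := by simp [h]
      rw [h', PySem.Dict.get?_insert_of_ne _ _ (fun hc => h hc.symm), ih d0]

-- find? of a weaker predicate on a decomposition whose prefix fails the strong one
theorem pvFind?_snd_self (line : String) (j : Int) (s : String) (as bs : List (Int × String))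
    (h : ∀ a ∈ as, PySem.Str.endswith line a.2 ≠ true)
    (hs : PySem.Str.endswith line s = true) :
    (as ++ (j, s) :: bs).find? (fun q => q.2 == s) = some (j, s) := by
  induction as with
  | nil => simp
  | cons a t ih =>
    have ha : ¬ (PySem.Str.endswith line a.2 = true) := h a (by simp)
    have hne : (a.2 == s) = false := by
      by_cases he : a.2 = s
      · exact absurd (he ▸ hs) ha
      · simp [he]
    simp only [List.cons_append, List.find?_cons, hne]
    exact ih (fun x hx => h x (by simp [hx]))

-- suffix slice facts: for a Nat length L ≤ |line|, line[n-L:] is a suffix of length L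
theorem pvSuf_toList (line : String) (L : Nat) (hL : L ≤ line.toList.length) :
    (PySem.Str.slice line (some ((line.toList.length : Int) - (L : Int))) none).toList
      = line.toList.drop (line.toList.length - L) := by
  have : (line.toList.length : Int) - (L : Int) = ((line.toList.length - L : Nat) : Int) := by
    omega
  rw [this]
  simp [pysem, PySem.List.slice_from_natCast]

theorem pvSuffix_eq_drop (line : String) (s : String) (hs : s.toList <:+ line.toList) :
    line.toList.drop (line.toList.length - s.toList.length) = s.toList := by
  obtain ⟨t, ht⟩ := hs
  rw [← ht]
  simp

-- B's loop body, named for the fold lemmas (defeq to the lambda in the port)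
def pvStep (line : String) (d : PySem.Dict String Int) (n : Int) (acc : String × Int) (L : Int) : String × Int :=
  if L ≤ n then
    let suf := PySem.Str.slice line (some (n - L)) none
    let i := d.getD suf (-1)
    if acc.2 < i then (suf, i) else acc
  else acc

-- B's dict answers queries by first match over the reversed enumeration
theorem pvGet (xs : List String) (s : String) :
    ((PySem.List.enumerate xs 0).foldl (fun d q => d.insert q.2 q.1) PySem.Dict.empty).get? s =
      (((PySem.List.enumerate xs 0).reverse).find? (fun q => q.2 == s)).map (·.1) := by
  rw [pvDict_get?]
  cases h : ((PySem.List.enumerate xs 0).reverse).find? (fun q => q.2 == s) <;>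
    simp [PySem.Dict.get?, PySem.Dict.empty]

-- if no candidate beats the accumulator, the loop keeps it
theorem pvFoldKeep (line : String) (d : PySem.Dict String Int) (n : Int) (lens : List Int)
    (acc : String × Int)
    (h : ∀ L ∈ lens, L ≤ n → d.getD (PySem.Str.slice line (some (n - L)) none) (-1) ≤ acc.2) :
    lens.foldl (pvStep line d n) acc = acc := by
  induction lens with
  | nil => rfl
  | cons L rest ih =>
    have hstep : pvStep line d n acc L = acc := by
      unfold pvStep
      by_cases hL : L ≤ n
      · have h1 := h L (by simp) hL
        have h2 : ¬ acc.2 < d.getD (PySem.Str.slice line (some (n - L)) none) (-1) := by omega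
        simp [hL, h2]
      · simp [hL]
    rw [List.foldl_cons, hstep]
    exact ih (fun L' hL' => h L' (by simp [hL']))

-- the winning candidate (sstar, j) is reached and then kept
theorem pvFoldWin (line : String) (d : PySem.Dict String Int) (n : Int) (j : Int) (sstar : String)
    (Lstar : Int) (lens : List Int) (acc : String × Int)
    (hmem : Lstar ∈ lens) (hLn : Lstar ≤ n)
    (hsuf : PySem.Str.slice line (some (n - Lstar)) none = sstar)
    (hget : d.getD sstar (-1) = j)
    (hub : ∀ L ∈ lens, L ≤ n → d.getD (PySem.Str.slice line (some (n - L)) none) (-1) ≤ j)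
    (hstrict : ∀ L ∈ lens, L ≤ n → L ≠ Lstar → d.getD (PySem.Str.slice line (some (n - L)) none) (-1) < j)
    (hacc : acc.2 < j) :
    lens.foldl (pvStep line d n) acc = (sstar, j) := by
  induction lens generalizing acc with
  | nil => cases hmem
  | cons L rest ih =>
    rw [List.foldl_cons]
    by_cases hL : L = Lstar
    · subst hL
      have hstep : pvStep line d n acc L = (sstar, j) := by
        unfold pvStep
        simp only [hLn, if_true, hsuf, hget]
        simp [hacc]
      rw [hstep]
      exact pvFoldKeep line d n rest (sstar, j)
        (fun L' hL' hn => by simpa using hub L' (by simp [hL']) hn)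
    · have hmem' : Lstar ∈ rest := by
        rcases List.mem_cons.mp hmem with h | h
        · exact absurd h.symm hL
        · exact h
      have hacc' : (pvStep line d n acc L).2 < j := by
        unfold pvStep
        by_cases hn : L ≤ n
        · simp only [hn, if_true]
          by_cases hb : acc.2 < d.getD (PySem.Str.slice line (some (n - L)) none) (-1)
          · simpa [hb] using hstrict L (by simp) hn hL
          · simpa [hb] using hacc
        · simpa [hn] using hacc
      exact ih _ hmem' (fun L' hL' hn => hub L' (List.mem_cons_of_mem _ hL') hn)
        (fun L' hL' hn hne => hstrict L' (List.mem_cons_of_mem _ hL') hn hne) hacc'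

-- the central fact: B's argmax loop picks exactly A's last matching newline
theorem pvKey (xs : List String) (line : String) :
    ((PySem.Set.ofList (xs.map fun nl => ((PySem.Str.len nl : Int)))).foldl
      (fun (acc : String × Int) L =>
        if L ≤ (PySem.Str.len line : Int) then
          let suf := PySem.Str.slice line (some ((PySem.Str.len line : Int) - L)) none
          let i := ((PySem.List.enumerate xs 0).foldl (fun d q => d.insert q.2 q.1)
              PySem.Dict.empty).getD suf (-1)
          if acc.2 < i then (suf, i) else acc
        else acc) ("", -1)).1 = pvFindA line xs.reverse := by
  set d := (PySem.List.enumerate xs 0).foldl (fun d q => d.insert q.2 q.1) PySem.Dict.empty with hd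
  set n : Int := (PySem.Str.len line : Int) with hn0
  set R := (PySem.List.enumerate xs 0).reverse with hR
  have hn : n = (line.toList.length : Int) := by simp [hn0, pysem]
  have hlen_eq : ∀ t : String, PySem.Str.len t = (t.toList.length : Int) := by
    intro t; simp [pysem]
  have hmapsnd : R.map (·.2) = xs.reverse := by
    rw [hR, List.map_reverse]
    rw [show ((PySem.List.enumerate xs 0).map (·.2)) = xs from PySem.List.map_snd_enumerate xs 0]
  have hA : pvFindA line xs.reverse =
      ((R.find? (fun q => PySem.Str.endswith line q.2)).map (·.2)).getD "" := by
    rw [pvFindA_eq_find?, ← hmapsnd, List.find?_map]; rfl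
  -- any probed suffix really is a suffix of line, of the probed length
  have hsufx : ∀ L : Int, 0 ≤ L → L ≤ n →
      (PySem.Str.slice line (some (n - L)) none).toList
        = line.toList.drop (line.toList.length - L.toNat) ∧
      PySem.Str.endswith line (PySem.Str.slice line (some (n - L)) none) = true := by
    intro L h0 hL
    have hcast : L = ((L.toNat : Nat) : Int) := by omega
    have hLle : L.toNat ≤ line.toList.length := by omega
    rw [hn, hcast]
    have h1 := pvSuf_toList line L.toNat hLle
    refine ⟨h1, ?_⟩
    have h2 : (PySem.Str.slice line (some ((line.toList.length : Int) - ((L.toNat : Nat) : Int))) none).toList <:+ line.toList := by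
      rw [h1]; exact List.drop_suffix _ _
    have h3 := (PySem.Chars.endswith_iff line.toList _).mpr h2
    simpa using h3
  have hnonnegL : ∀ L, L ∈ PySem.Set.ofList (xs.map fun nl => ((PySem.Str.len nl : Int))) → 0 ≤ L := by
    intro L hm
    obtain ⟨nl, _, rfl⟩ := List.mem_map.mp ((PySem.Set.mem_ofList _ _).mp hm)
    rw [hlen_eq nl]
    positivity
  cases hfind : R.find? (fun q => PySem.Str.endswith line q.2) with
  | none =>
    have hnone : ∀ q ∈ R, ¬ (PySem.Str.endswith line q.2 = true) := by
      intro q hq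
      have := List.find?_eq_none.mp hfind q hq
      simpa using this
    have hkeep := pvFoldKeep line d n
      (PySem.Set.ofList (xs.map fun nl => ((PySem.Str.len nl : Int)))) ("", -1) ?_
    · rw [show (fun (acc : String × Int) L =>
          if L ≤ n then
            let suf := PySem.Str.slice line (some (n - L)) none
            let i := d.getD suf (-1)
            if acc.2 < i then (suf, i) else acc
          else acc) = pvStep line d n from rfl, hkeep, hA, hfind]
      rfl
    · intro L hm hLn
      obtain ⟨_, hps⟩ := hsufx L (hnonnegL L hm) hLn
      set suf := PySem.Str.slice line (some (n - L)) none with hsufdef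
      have hq : d.get? suf = none := by
        rw [hd, pvGet, ← hR]
        cases hq : R.find? (fun q => q.2 == suf) with
        | none => simp
        | some q =>
          have hqR := List.mem_of_find?_eq_some hq
          have hq2 : q.2 = suf := by simpa using List.find?_some hq
          exact absurd (hq2 ▸ hps) (hnone q hqR)
      rw [PySem.Dict.getD_eq_get?_getD, hq]
      simp
  | some a =>
    obtain ⟨j, sstar⟩ := a
    obtain ⟨hp, as, bs, hdecomp, hfail⟩ := List.find?_eq_some_iff_append.mp hfind
    have hfail' : ∀ q ∈ as, PySem.Str.endswith line q.2 ≠ true := by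
      intro q hq; simpa using hfail q hq
    have hmemR : (j, sstar) ∈ R := List.mem_of_find?_eq_some hfind
    have hjx : 0 ≤ j ∧ sstar ∈ xs := by
      rw [hR, List.mem_reverse, PySem.List.mem_enumerate_iff] at hmemR
      obtain ⟨k, hk, he⟩ := hmemR
      have h1 := congrArg Prod.fst he
      have h2 := congrArg Prod.snd he
      simp at h1 h2
      subst h2
      exact ⟨by omega, by simp⟩
    have hsfx : sstar.toList <:+ line.toList := by
      have hp' := hp
      simp only [PySem.Str.endswith_eq] at hp'
      exact (PySem.Chars.endswith_iff _ _).mp hp'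
    have hlen : sstar.toList.length ≤ line.toList.length := hsfx.length_le
    have hLstar0 : 0 ≤ PySem.Str.len sstar := by rw [hlen_eq]; positivity
    have hLn' : PySem.Str.len sstar ≤ n := by rw [hlen_eq, hn]; exact_mod_cast hlen
    have hsufstar : PySem.Str.slice line (some (n - PySem.Str.len sstar)) none = sstar := by
      apply String.toList_inj.mp
      obtain ⟨h1, _⟩ := hsufx (PySem.Str.len sstar) hLstar0 hLn'
      rw [h1]
      have : (PySem.Str.len sstar).toNat = sstar.toList.length := by
        rw [hlen_eq]; simp
      rw [this, pvSuffix_eq_drop line sstar hsfx]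
    have hpair : R.Pairwise (fun a b => b.1 < a.1) := by
      rw [hR, List.pairwise_reverse]
      exact PySem.List.pairwise_lt_enumerate xs 0
    have hbs : ∀ q ∈ bs, q.1 < j := by
      rw [hdecomp] at hpair
      have h1 := (List.pairwise_append.mp hpair).2.1
      exact fun q hq => (List.pairwise_cons.mp h1).1 q hq
    have hget : d.getD sstar (-1) = j := by
      rw [hd, PySem.Dict.getD_eq_get?_getD, pvGet, ← hR, hdecomp,
        pvFind?_snd_self line j sstar as bs hfail' hp]
      rfl
    -- every probed candidate is bounded by j, strictly so for other lengths
    have hcand : ∀ L, L ∈ PySem.Set.ofList (xs.map fun nl => ((PySem.Str.len nl : Int))) → L ≤ n →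
        d.getD (PySem.Str.slice line (some (n - L)) none) (-1) ≤ j ∧
        (L ≠ PySem.Str.len sstar →
          d.getD (PySem.Str.slice line (some (n - L)) none) (-1) < j) := by
      intro L hm hLle
      have h0 := hnonnegL L hm
      obtain ⟨hdropeq, hps⟩ := hsufx L h0 hLle
      set suf := PySem.Str.slice line (some (n - L)) none with hsufdef
      rw [PySem.Dict.getD_eq_get?_getD, hd, pvGet, ← hR]
      cases hq : R.find? (fun q => q.2 == suf) with
      | none =>
        constructor
        · simp; omega
        · intro _; simp; omega
      | some q =>
        have hqR := List.mem_of_find?_eq_some hq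
        have hq2 : q.2 = suf := by simpa using List.find?_some hq
        have hqps : PySem.Str.endswith line q.2 = true := hq2 ▸ hps
        have hqmem : q ∈ as ++ (j, sstar) :: bs := hdecomp ▸ hqR
        rcases List.mem_append.mp hqmem with hin | hin
        · exact absurd hqps (hfail' q hin)
        · rcases List.mem_cons.mp hin with hin | hin
          · subst hin
            constructor
            · simp
            · intro hne
              exfalso
              apply hne
              have hsl : suf.toList.length = L.toNat := by
                rw [hdropeq, List.length_drop]
                omega
              have hsfeq : suf = sstar := by simpa using hq2.symm
              rw [hlen_eq, ← hsfeq, hsl]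
              omega
          · have := hbs q hin
            constructor
            · simp; omega
            · intro _; simp; omega
    have hwin := pvFoldWin line d n j sstar (PySem.Str.len sstar)
      (PySem.Set.ofList (xs.map fun nl => ((PySem.Str.len nl : Int)))) ("", -1)
      ?_ hLn' hsufstar hget (fun L hm hLle => (hcand L hm hLle).1)
      (fun L hm hLle hne => (hcand L hm hLle).2 hne) (by simp; omega)
    · rw [show (fun (acc : String × Int) L =>
          if L ≤ n then
            let suf := PySem.Str.slice line (some (n - L)) none
            let i := d.getD suf (-1)
            if acc.2 < i then (suf, i) else acc
          else acc) = pvStep line d n from rfl, hwin, hA, hfind]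
      rfl
    · rw [PySem.Set.mem_ofList]
      exact List.mem_map.mpr ⟨sstar, hjx.2, rfl⟩

-- ===== VERDICT (by name: the statement is the Claim_ definition above) =====
theorem split_out_newline__spec : Claim_equal_split_out_newline_ := by
  intro newlines line _
  unfold Spec_split_out_newline_ split_out_newline_ split_out_newline__alt
  rw [← pvKey newlines line]
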